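-- pv_equiv track=rewrite | github.com/NikodemWojtczak/telekomuna | zad1/error_correction.py | is_binary_valid
-- ===== SOURCE A (Python) =====
-- def is_binary_valid(binary_string):
--     """
--     Sprawdza, czy zakodowana wiadomość przedstawiona za pomocą ciągu bitów jest sformatowana poprawnie, tj.
--     czy długość wiadomości jest większa od 0, czy długość wiadomości jest wielokrotnością 16, czy w wiadomości
--     nie znajdują się znaki niedozwolone (inne niż 0 i 1).
--     :param binary_string: napis będący zakodowaną wiadomością w postaci binarnej (string)
--     :return: True gdy w wiadomości nie ma błędów, False gdy w wiadomości są błędy (boolean)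
--     """
--     if not all(char in '01' for char in binary_string):
--         return False
--     if len(binary_string) % 16 != 0:
--         return False
--     if len(binary_string) == 0:
--         return False
--     return True
-- ===== SOURCE B (Python) =====
-- def is_binary_valid(binary_string):
--     """Single left-to-right scan consuming 16-character '01' blocks."""
--     if not binary_string:
--         return False
--     i = 0
--     n = len(binary_string)
--     while i < n:
--         block = binary_string[i:i + 16]
--         if len(block) != 16:
--             return False
--         for c in block:
--             if c != '0' and c != '1':
--                 return False
--         i += 16
--     return True
-- ===== Notes on version B (the rewrite author's own statement) =====
-- stated objective: alternative
-- what changed: A makes three separate whole-string passes (char check, length mod 16, emptiness); B makes one left-to-right scan that consumes 16-character blocks of '0'/'1', so the length and character conditions are checked together in a single traversal.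
import Mathlib
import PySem

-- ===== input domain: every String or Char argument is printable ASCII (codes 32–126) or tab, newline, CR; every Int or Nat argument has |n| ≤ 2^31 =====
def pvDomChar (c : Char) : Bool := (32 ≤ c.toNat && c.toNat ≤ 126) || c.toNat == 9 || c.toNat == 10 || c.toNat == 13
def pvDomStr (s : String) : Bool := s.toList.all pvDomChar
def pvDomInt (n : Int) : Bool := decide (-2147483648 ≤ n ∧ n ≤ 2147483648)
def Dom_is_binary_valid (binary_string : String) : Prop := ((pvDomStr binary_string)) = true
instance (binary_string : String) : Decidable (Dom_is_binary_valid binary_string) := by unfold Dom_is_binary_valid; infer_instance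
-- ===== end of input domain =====

-- B replaces A's three separate whole-string checks by one scan consuming 16-char '01' blocks (alternative decomposition, same cost).

-- ===== PORT A =====
-- A: three sequential guards — all chars in '01', length % 16 == 0, length != 0.
def is_binary_valid (binary_string : String) : Bool :=
  if !(binary_string.toList.all fun c => c == '0' || c == '1') then false
  else if binary_string.toList.length % 16 ≠ 0 then false
  else if binary_string.toList.length == 0 then false
  else true

-- ===== PORT B =====
-- B's while-loop: consume a 16-char block of '0'/'1' at a time, fail if a block is short or has a bad char.
def pvChunkValid (l : List Char) : Bool :=
  match l with
  | [] => true
  | c :: rest =>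
    let block := (c :: rest).take 16
    if block.length ≠ 16 then false
    else if !(block.all fun ch => ch == '0' || ch == '1') then false
    else pvChunkValid ((c :: rest).drop 16)
termination_by l.length
decreasing_by
  simp only [List.length_drop, List.length_cons]
  omega

def is_binary_valid_alt (binary_string : String) : Bool :=
  if binary_string.toList.isEmpty then false
  else pvChunkValid binary_string.toList

-- ===== PRECONDITION & SPEC =====
def Spec_is_binary_valid (binary_string : String) (out : Bool) : Prop := out = is_binary_valid_alt binary_string
instance (binary_string : String) (out : Bool) : Decidable (Spec_is_binary_valid binary_string out) := by unfold Spec_is_binary_valid; infer_instance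

-- ===== CLAIM (what is proved, stated in full; the proofs are below) =====
def Claim_equal_is_binary_valid : Prop := ∀ (binary_string : String), Dom_is_binary_valid binary_string → Spec_is_binary_valid binary_string (is_binary_valid binary_string)

-- ===== LEMMAS AND PROOFS =====

theorem pvChunkValid_eq (l : List Char) :
    pvChunkValid l = ((l.all fun c => c == '0' || c == '1') && decide (l.length % 16 = 0)) := by
  induction l using pvChunkValid.induct with
  | case1 => rw [pvChunkValid]; simp
  | case2 c rest blk hlen =>
    rw [pvChunkValid]
    rw [if_pos hlen]
    simp only [Bool.false_eq, Bool.and_eq_false_iff]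
    simp only [blk, List.length_take, List.length_cons] at hlen
    right
    simp only [decide_eq_false_iff_not, List.length_cons]
    omega
  | case3 c rest blk hlen hbad =>
    rw [pvChunkValid, if_neg hlen, if_pos hbad]
    have hfalse : ((c :: rest).all fun ch => ch == '0' || ch == '1') = false := by
      have hbad' : (List.take 16 (c :: rest)).all (fun ch => ch == '0' || ch == '1') = false := by
        rw [← Bool.not_eq_true']
        exact hbad
      obtain ⟨ch, hc, hcb⟩ := List.all_eq_false.mp hbad'
      exact List.all_eq_false.mpr ⟨ch, List.mem_of_mem_take hc, hcb⟩
    rw [hfalse]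
    simp
  | case4 c rest blk hlen hok ih =>
    rw [pvChunkValid, if_neg hlen, if_neg hok, ih]
    have hok' : (List.take 16 (c :: rest)).all (fun ch => ch == '0' || ch == '1') = true := by
      cases h : (List.take 16 (c :: rest)).all (fun ch => ch == '0' || ch == '1')
      · exact absurd (by rw [Bool.not_eq_true']; exact h) hok
      · rfl
    have hlen' : (16 : Nat) ≤ (c :: rest).length := by
      have := hlen
      simp only [blk, List.length_take, List.length_cons] at this
      simp only [List.length_cons]
      omega
    have hall : ((c :: rest).all fun ch => ch == '0' || ch == '1')
        = (((List.take 16 (c :: rest)).all fun ch => ch == '0' || ch == '1')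
            && ((List.drop 16 (c :: rest)).all fun ch => ch == '0' || ch == '1')) := by
      rw [← List.all_append, List.take_append_drop]
    have hmod : (List.drop 16 (c :: rest)).length % 16 = (c :: rest).length % 16 := by
      simp only [List.length_drop]
      omega
    rw [hall, hok', hmod]
    simp

theorem is_binary_valid_spec : Claim_equal_is_binary_valid := by
  intro s _
  unfold Spec_is_binary_valid is_binary_valid is_binary_valid_alt
  rw [pvChunkValid_eq]
  by_cases hz : s.toList.isEmpty = true
  · have hzl : s.toList.length = 0 := List.isEmpty_iff_length_eq_zero.mp hz
    rw [if_pos hz]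
    cases hall : (s.toList.all fun c => c == '0' || c == '1')
    · simp
    · simp [hzl]
  · have hzl : s.toList.length ≠ 0 := fun h => hz (List.isEmpty_iff_length_eq_zero.mpr h)
    have hne : ¬ s = "" := fun he => hzl (by rw [he]; rfl)
    rw [if_neg hz]
    cases hall : (s.toList.all fun c => c == '0' || c == '1')
    · simp [hall]
    · by_cases hmod : s.toList.length % 16 = 0
      · simp [hmod, hne]
      · simp [hne]
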